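-- pv_equiv track=rewrite | github.com/koii-network/prometheus-beta | src/fibonacci_subsequence.py | generate_fibonacci_subsequence
-- ===== SOURCE A (Python) =====
-- def generate_fibonacci_subsequence(n):
--     """
--     Generate a Fibonacci subsequence where the sum of even-indexed numbers is equal to n.
--
--     Args:
--         n (int): The target sum of even-indexed numbers in the subsequence.
--
--     Returns:
--         list: A Fibonacci subsequence satisfying the condition.
--
--     Raises:
--         ValueError: If n is negative or cannot be achieved with a valid subsequence.
--     """
--     # Handle edge cases
--     if n < 0:
--         raise ValueError("Input must be a non-negative integer")
--
--     if n > 10000: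
--         raise ValueError(f"Input {n} is too large to generate a subsequence")
--
--     if n == 0:
--         return [0, 0]  # Ensure minimum length of 2
--
--     if n == 1:
--         return [1, 0]
--
--     # Try different subsequence lengths
--     for length in range(2, 50):  # Reasonable upper limit
--         # Generate candidate subsequences
--         for start_index in range(length):
--             subsequence = [0] * length
--
--             # Set initial conditions
--             subsequence[start_index] = n
--
--             # Try to generate a valid subsequence
--             try:
--                 # Attempt to fill in Fibonacci-like sequence
--                 for i in range(length):
--                     if i == start_index:
--                         continue
--
--                     # Generate subsequent values
--                     if i > 0 and i < length - 1:
--                         if i > start_index: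
--                             # Right side: standard Fibonacci
--                             subsequence[i] = subsequence[i-1] + subsequence[i-2]
--                         elif i < start_index:
--                             # Left side: special generation
--                             if i == start_index - 1:
--                                 subsequence[i] = 0  # Specific requirement
--                             else:
--                                 subsequence[i] = subsequence[i+1] - subsequence[start_index]
--
--                 # Verify the condition
--                 even_sum = sum(subsequence[j] for j in range(length) if j % 2 == 0)
--
--                 if even_sum == n:
--                     return subsequence
--
--             except Exception:
--                 # If generation fails, continue to next iteration
--                 continue
--
--     # If no subsequence found
--     raise ValueError(f"No Fibonacci subsequence found for input {n}")
-- ===== SOURCE B (Python) =====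
-- def generate_fibonacci_subsequence(n):
--     """Closed form: [n, 0] has even-index sum n and length 2; no search needed."""
--     if n < 0:
--         raise ValueError("Input must be a non-negative integer")
--     if n > 10000:
--         raise ValueError(f"Input {n} is too large to generate a subsequence")
--     return [n, 0]
-- ===== Notes on version B (the rewrite author's own statement) =====
-- stated objective: simpler
-- what changed: A's bounded search over lengths and start indices always succeeds at its very first candidate (length 2, start 0), which is exactly [n, 0]; B keeps the two ValueError guards and returns [n, 0] directly, with no search loop.
import Mathlib
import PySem

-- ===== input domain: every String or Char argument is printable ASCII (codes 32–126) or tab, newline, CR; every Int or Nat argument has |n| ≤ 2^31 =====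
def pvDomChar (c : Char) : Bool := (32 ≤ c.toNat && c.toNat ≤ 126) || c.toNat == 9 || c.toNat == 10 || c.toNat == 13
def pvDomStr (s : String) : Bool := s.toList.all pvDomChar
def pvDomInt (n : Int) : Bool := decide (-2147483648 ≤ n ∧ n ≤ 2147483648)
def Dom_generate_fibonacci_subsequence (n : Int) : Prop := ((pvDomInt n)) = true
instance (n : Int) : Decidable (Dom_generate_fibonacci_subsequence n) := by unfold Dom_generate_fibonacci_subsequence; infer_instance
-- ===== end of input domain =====

-- B replaces A's search over candidate lengths/start indices by its closed-form result [n, 0] (simpler).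

-- ===== PORT A =====
-- one candidate subsequence: [0]*length, set start to n, then the fill loop
def pvFillA (n length start : Int) : List Int :=
  let sub := PySem.List.pySetD (List.replicate length.toNat 0) start n
  (PySem.List.pyRange 0 length 1).foldl (fun sub i =>
    if i == start then sub
    else if i > 0 && i < length - 1 then
      if i > start then
        PySem.List.pySetD sub i (PySem.List.pyGetD sub (i-1) 0 + PySem.List.pyGetD sub (i-2) 0)
      else if i < start then
        (if i == start - 1 then PySem.List.pySetD sub i 0
         else PySem.List.pySetD sub i (PySem.List.pyGetD sub (i+1) 0 - PySem.List.pyGetD sub start 0))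
      else sub
    else sub) sub

-- the candidate loop: for length in range(2,50): for start_index in range(length)
def pvSearchA (n : Int) : List (Int × Int) → Option (List Int)
  | [] => none
  | (length, start) :: rest =>
      let sub := pvFillA n length start
      let even_sum := ((PySem.List.pyRange 0 length 1).filter
          (fun j => PySem.Int.mod j 2 == 0)).foldl (fun acc j => acc + PySem.List.pyGetD sub j 0) 0
      if even_sum == n then some sub else pvSearchA n rest

def pvCandidatesA : List (Int × Int) :=
  (PySem.List.pyRange 2 50 1).flatMap (fun length =>
    (PySem.List.pyRange 0 length 1).map (fun s => (length, s)))

def generate_fibonacci_subsequence (n : Int) : List Int :=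
  if n < 0 then []                 -- raise ValueError (excluded by Pre_)
  else if n > 10000 then []        -- raise ValueError (excluded by Pre_)
  else if n == 0 then [0, 0]
  else if n == 1 then [1, 0]
  else match pvSearchA n pvCandidatesA with
    | some s => s
    | none => []                   -- raise ValueError (unreachable for 0 ≤ n ≤ 10000)

-- ===== PORT B =====
def generate_fibonacci_subsequence_alt (n : Int) : List Int :=
  if n < 0 then []                 -- raise ValueError (excluded by Pre_)
  else if n > 10000 then []        -- raise ValueError (excluded by Pre_)
  else [n, 0]

-- ===== PRECONDITION & SPEC =====
-- Pre_: exactly the inputs on which Python A returns normally (outside, both raise ValueError)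
def Pre_generate_fibonacci_subsequence (n : Int) : Prop := 0 ≤ n ∧ n ≤ 10000
instance (n : Int) : Decidable (Pre_generate_fibonacci_subsequence n) := by
  unfold Pre_generate_fibonacci_subsequence; infer_instance
def pvWitness_generate_fibonacci_subsequence : Int := (7)

def Spec_generate_fibonacci_subsequence (n : Int) (out : List Int) : Prop := out = generate_fibonacci_subsequence_alt n
instance (n : Int) (out : List Int) : Decidable (Spec_generate_fibonacci_subsequence n out) := by unfold Spec_generate_fibonacci_subsequence; infer_instance

-- ===== CLAIM (what is proved, stated in full; the proofs are below) =====
def Claim_equal_generate_fibonacci_subsequence : Prop := ∀ (n : Int), Dom_generate_fibonacci_subsequence n → Pre_generate_fibonacci_subsequence n → Spec_generate_fibonacci_subsequence n (generate_fibonacci_subsequence n)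

-- ===== LEMMAS AND PROOFS =====

-- A's search succeeds at its very first candidate (length 2, start 0) with [n, 0]
lemma pvSearchA_head (n : Int) (rest : List (Int × Int)) :
    pvSearchA n ((2, 0) :: rest) = some [n, 0] := by
  have h2 : PySem.List.pyRange 0 2 1 = [0, 1] := by decide
  simp [pvSearchA, pvFillA, h2, PySem.List.pySetD, PySem.List.pySet?, PySem.List.pyGetD,
        PySem.List.pyGet?, PySem.List.pyIdx?, PySem.Int.mod, List.replicate]

-- the first candidate of A's double loop is (2, 0)
lemma pvCandidatesA_cons : ∃ rest, pvCandidatesA = (2, 0) :: rest := by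
  have h : PySem.List.pyRange 2 50 1 = 2 :: PySem.List.pyRange 3 50 1 :=
    PySem.List.pyRange_one_cons (by norm_num)
  have h2 : PySem.List.pyRange 0 2 1 = [0, 1] := by decide
  refine ⟨(2, 1) :: (PySem.List.pyRange 3 50 1).flatMap (fun length =>
    (PySem.List.pyRange 0 length 1).map (fun s => (length, s))), ?_⟩
  rw [pvCandidatesA, h, List.flatMap_cons, h2]
  rfl

-- ===== VERDICT (by name: the statement is the Claim_ definition above) =====
theorem generate_fibonacci_subsequence_spec : Claim_equal_generate_fibonacci_subsequence := by
  intro n _ hpre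
  obtain ⟨h0, h1⟩ := hpre
  unfold Spec_generate_fibonacci_subsequence generate_fibonacci_subsequence generate_fibonacci_subsequence_alt
  have hnlt : ¬ n < 0 := not_lt.mpr h0
  have hngt : ¬ n > 10000 := not_lt.mpr h1
  simp only [hnlt, hngt, if_false]
  by_cases hz : n = 0
  · simp [hz]
  · by_cases ho : n = 1
    · simp [ho]
    · obtain ⟨rest, hr⟩ := pvCandidatesA_cons
      simp [hz, ho, hr, pvSearchA_head]
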